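-- pv_equiv track=rewrite | github.com/daniel-reich/ubiquitous-fiesta | KETgxWCWtrk7oLM49_7.py | winnerByGoal
-- ===== SOURCE A (Python) =====
-- def winnerByGoal(scores):
--   max = 0
--   for i, score in enumerate(scores):
--     if score[2] > scores[max][2]:
--       max = i
--   for i, score in enumerate(scores):
--     if i != max and score[2] == scores[max][2]:
--       return winnerByDif(list(filter(lambda x: x[2]==scores[max][2], scores)))
--   return scores[max]
--
-- def winnerByDif(scores):
--   max = 0
--   for i, score in enumerate(scores):
--     if score[3] > scores[max][3]:
--       max = i
--   return scores[max]
-- ===== SOURCE B (Python) =====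
-- def winnerByGoal(scores):
--     top = sorted(scores, key=lambda s: s[2], reverse=True)[0][2]
--     group = [s for s in scores if s[2] == top]
--     if len(group) == 1:
--         return group[0]
--     return max(group, key=lambda s: s[3])
-- ===== Notes on version B (the rewrite author's own statement) =====
-- stated objective: alternative
-- what changed: Replaces A's index-tracking argmax loop, tie-detection pass and winnerByDif helper by a sort-based selection: sort descending by goals to read off the top goal count, filter the top-goal group once, and return the single row or the first max-difference row of the group via max(key=...).
import Mathlib
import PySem

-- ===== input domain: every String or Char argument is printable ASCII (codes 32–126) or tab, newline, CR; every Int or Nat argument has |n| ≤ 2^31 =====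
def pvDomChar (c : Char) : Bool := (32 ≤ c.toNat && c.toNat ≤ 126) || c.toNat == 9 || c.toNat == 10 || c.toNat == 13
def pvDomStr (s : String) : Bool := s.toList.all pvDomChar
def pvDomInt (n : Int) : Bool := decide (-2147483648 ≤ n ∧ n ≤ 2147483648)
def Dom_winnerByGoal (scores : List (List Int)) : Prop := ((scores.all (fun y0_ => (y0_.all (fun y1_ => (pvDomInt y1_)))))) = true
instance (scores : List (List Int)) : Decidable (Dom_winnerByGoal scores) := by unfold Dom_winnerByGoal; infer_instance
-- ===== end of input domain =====

-- B replaces A's index-tracking argmax loops, tie-detection pass and winnerByDif helper by a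
-- sort-based selection: sort descending by goals to read off the top goal count, filter that
-- group, and take it or its first max-difference row; alternative decomposition, not faster.

-- ===== PORT A =====
-- score[i] / scores[i] with the Python semantics (default is irrelevant inside Pre_, where every access is in range)
def rowA (scores : List (List Int)) (i : Int) : List Int := (PySem.List.pyGet? scores i).getD []
def gA (s : List Int) (i : Int) : Int := (PySem.List.pyGet? s i).getD 0

-- 'max = 0; for i, score in enumerate(scores): if f(score) > f(scores[max]): max = i' (shared shape of A's two loops)
def loopIdxA (f : List Int → Int) (scores : List (List Int)) : List (List Int) → Int → Int → Int
  | [], _, m => m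
  | s :: rest, i, m => loopIdxA f scores rest (i + 1) (if f s > f (rowA scores m) then i else m)

-- 'for i, score in enumerate(scores): if i != max and score[2] == scores[max][2]: return …'
def tieLoopA (scores : List (List Int)) (m : Int) : List (List Int) → Int → Bool
  | [], _ => false
  | s :: rest, i => if i ≠ m ∧ gA s 2 = gA (rowA scores m) 2 then true else tieLoopA scores m rest (i + 1)

def winnerByDif (scores : List (List Int)) : List Int :=
  rowA scores (loopIdxA (fun s => gA s 3) scores scores 0 0)

def winnerByGoal (scores : List (List Int)) : List Int :=
  let m := loopIdxA (fun s => gA s 2) scores scores 0 0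
  if tieLoopA scores m scores 0 then
    winnerByDif (scores.filter (fun x => gA x 2 == gA (rowA scores m) 2))
  else rowA scores m

-- ===== PORT B =====
def gB (s : List Int) (i : Int) : Int := (PySem.List.pyGet? s i).getD 0

def winnerByGoal_alt (scores : List (List Int)) : List Int :=
  -- top = sorted(scores, key=lambda s: s[2], reverse=True)[0][2]   ([0] raises on empty, outside Pre_)
  let ordered := PySem.List.sorted scores (fun s => gB s 2) true
  let top := gB ((PySem.List.pyGet? ordered 0).getD []) 2
  -- group = [s for s in scores if s[2] == top]
  let group := scores.filter (fun s => gB s 2 == top)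
  if group.length = 1 then (PySem.List.pyGet? group 0).getD []
  else (PySem.List.max? group (fun s => gB s 3)).getD []

-- ===== PRECONDITION & SPEC =====
-- Exactly the inputs on which the Python A returns: scores nonempty (else scores[max] raises
-- IndexError), every row has a 3rd entry (score[2] is read from every row), and when the maximal
-- goal count is shared by several rows, each row attaining it has a 4th entry (winnerByDif then
-- reads score[3] of exactly those rows).
def Pre_winnerByGoal (scores : List (List Int)) : Prop :=
  scores ≠ [] ∧ (∀ s ∈ scores, 3 ≤ s.length) ∧
    (1 < scores.countP
        (fun s => s.getD 2 0 = (scores.map (fun s => s.getD 2 0)).foldl max ((scores.headD []).getD 2 0)) →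
      ∀ s ∈ scores,
        s.getD 2 0 = (scores.map (fun s => s.getD 2 0)).foldl max ((scores.headD []).getD 2 0) →
        4 ≤ s.length)
instance (scores : List (List Int)) : Decidable (Pre_winnerByGoal scores) := by
  unfold Pre_winnerByGoal; infer_instance

def pvWitness_winnerByGoal : List (List Int) := [[1, 2, 3, 4], [0, 1, 3, 2]]

def Spec_winnerByGoal (scores : List (List Int)) (out : List Int) : Prop := out = winnerByGoal_alt scores
instance (scores : List (List Int)) (out : List Int) : Decidable (Spec_winnerByGoal scores out) := by unfold Spec_winnerByGoal; infer_instance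

-- ===== CLAIM (what is proved, stated in full; the proofs are below) =====
def Claim_equal_winnerByGoal : Prop := ∀ (scores : List (List Int)), Dom_winnerByGoal scores → Pre_winnerByGoal scores → Spec_winnerByGoal scores (winnerByGoal scores)

-- ===== LEMMAS AND PROOFS =====

-- first-occurrence argmax as a value-level fold
def pickF (f : List Int → Int) (b s : List Int) : List Int := if f s > f b then s else b

lemma rowA_of_getElem {scores : List (List Int)} {m : Int} {b : List Int}
    (hm : 0 ≤ m) (h : scores[m.toNat]? = some b) : rowA scores m = b := by
  simp [rowA, PySem.List.pyGet?_of_nonneg _ hm, h]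

lemma loopIdxA_spec (f : List Int → Int) (scores : List (List Int)) :
    ∀ (rest : List (List Int)) (i m : Int) (b : List Int), 0 ≤ i →
      scores.drop i.toNat = rest → 0 ≤ m → scores[m.toNat]? = some b →
      ∃ n : Nat, loopIdxA f scores rest i m = (n : Int) ∧
        scores[n]? = some (rest.foldl (pickF f) b) := by
  intro rest
  induction rest with
  | nil =>
    intro i m b _ _ hm hget
    exact ⟨m.toNat, by simp [loopIdxA, Int.toNat_of_nonneg hm], hget⟩
  | cons s rest ih =>
    intro i m b hi hdrop hm hget
    have hgets : scores[i.toNat]? = some s := by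
      have h0 : (scores.drop i.toNat)[0]? = some s := by rw [hdrop]; rfl
      rw [List.getElem?_drop] at h0
      simpa using h0
    have hdrop' : scores.drop (i + 1).toNat = rest := by
      have h1 : (i + 1).toNat = i.toNat + 1 := by omega
      have h2 : List.drop 1 (List.drop i.toNat scores) = List.drop (i.toNat + 1) scores := by
        rw [List.drop_drop]
      rw [h1, ← h2, hdrop]; rfl
    have hrow : rowA scores m = b := rowA_of_getElem hm hget
    rw [loopIdxA, hrow]
    by_cases hc : f s > f b
    · have := ih (i + 1) i (pickF f b s) (by omega) hdrop' hi
        (by simpa [pickF, hc] using hgets)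
      simpa [hc] using this
    · have := ih (i + 1) m (pickF f b s) (by omega) hdrop' hm
        (by simpa [pickF, hc] using hget)
      simpa [hc] using this

lemma foldl_pick_mem (f : List Int → Int) :
    ∀ (xs : List (List Int)) (b : List Int), xs.foldl (pickF f) b ∈ b :: xs := by
  intro xs
  induction xs with
  | nil => intro b; simp
  | cons s xs ih =>
    intro b
    rcases List.mem_cons.mp (ih (pickF f b s)) with h | h
    · rw [List.foldl_cons, h]
      simp only [pickF]
      split_ifs <;> simp
    · rw [List.foldl_cons]
      exact List.mem_cons.mpr (Or.inr (List.mem_cons.mpr (Or.inr h)))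

-- every element's key is bounded by the fold's key (the fold computes a running maximum)
lemma mem_le_pick (f : List Int → Int) :
    ∀ (xs : List (List Int)) (b x : List Int), x ∈ b :: xs → f x ≤ f (xs.foldl (pickF f) b) := by
  intro xs
  induction xs with
  | nil => intro b x hx; simp at hx; simp [hx]
  | cons s xs ih =>
    intro b x hx
    rw [List.foldl_cons]
    have hb : f b ≤ f (pickF f b s) := by simp only [pickF]; split_ifs with h <;> omega
    have hs : f s ≤ f (pickF f b s) := by simp only [pickF]; split_ifs with h <;> omega
    have hpick := ih (pickF f b s) (pickF f b s) (List.mem_cons_self ..)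
    rcases List.mem_cons.mp hx with rfl | hx'
    · exact le_trans hb hpick
    · rcases List.mem_cons.mp hx' with rfl | hx'' 
      · exact le_trans hs hpick
      · exact ih (pickF f b s) x (List.mem_cons.mpr (Or.inr hx''))

lemma tieLoopA_false (scores : List (List Int)) (m : Int) :
    ∀ (rest : List (List Int)) (i : Int), 0 ≤ i → scores.drop i.toNat = rest →
      tieLoopA scores m rest i = false →
      ∀ j : Nat, i.toNat ≤ j → (hj : j < scores.length) → (j : Int) ≠ m →
        gA scores[j] 2 ≠ gA (rowA scores m) 2 := by
  intro rest
  induction rest with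
  | nil =>
    intro i _ hdrop _ j hij hj _
    have : scores.length ≤ i.toNat := by
      have := congrArg List.length hdrop
      simp at this; omega
    omega
  | cons s rest ih =>
    intro i hi hdrop hfalse j hij hj hjm
    have hgets : scores[i.toNat]? = some s := by
      have h0 : (scores.drop i.toNat)[0]? = some s := by rw [hdrop]; rfl
      rw [List.getElem?_drop] at h0
      simpa using h0
    have hdrop' : scores.drop (i + 1).toNat = rest := by
      have h1 : (i + 1).toNat = i.toNat + 1 := by omega
      have h2 : List.drop 1 (List.drop i.toNat scores) = List.drop (i.toNat + 1) scores := by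
        rw [List.drop_drop]
      rw [h1, ← h2, hdrop]; rfl
    rw [tieLoopA] at hfalse
    by_cases hc : i ≠ m ∧ gA s 2 = gA (rowA scores m) 2
    · simp [hc] at hfalse
    · have hrest : tieLoopA scores m rest (i + 1) = false := by
        simpa [hc] using hfalse
      rcases Nat.eq_or_lt_of_le hij with heq | hlt
      · have hji : (j : Int) = i := by omega
        have hs : scores[j] = s := by
          have : scores[j]? = some s := by rw [show j = i.toNat by omega]; exact hgets
          simpa [List.getElem?_eq_getElem hj] using this
        rw [hs]
        intro heq2
        exact hc ⟨by rw [← hji]; exact hjm, heq2⟩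
      · exact ih (i + 1) (by omega) hdrop' hrest j (by omega) hj hjm

lemma tieLoopA_true (scores : List (List Int)) (m : Int) :
    ∀ (rest : List (List Int)) (i : Int), 0 ≤ i → scores.drop i.toNat = rest →
      tieLoopA scores m rest i = true →
      ∃ j : Nat, ∃ hj : j < scores.length, (j : Int) ≠ m ∧
        gA scores[j] 2 = gA (rowA scores m) 2 := by
  intro rest
  induction rest with
  | nil => intro i _ _ hfalse; simp [tieLoopA] at hfalse
  | cons s rest ih =>
    intro i hi hdrop htrue
    have hgets : scores[i.toNat]? = some s := by
      have h0 : (scores.drop i.toNat)[0]? = some s := by rw [hdrop]; rfl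
      rw [List.getElem?_drop] at h0
      simpa using h0
    have hdrop' : scores.drop (i + 1).toNat = rest := by
      have h1 : (i + 1).toNat = i.toNat + 1 := by omega
      have h2 : List.drop 1 (List.drop i.toNat scores) = List.drop (i.toNat + 1) scores := by
        rw [List.drop_drop]
      rw [h1, ← h2, hdrop]; rfl
    rw [tieLoopA] at htrue
    by_cases hc : i ≠ m ∧ gA s 2 = gA (rowA scores m) 2
    · have hlen : i.toNat < scores.length := by
        by_contra hcon
        rw [List.getElem?_eq_none (by omega)] at hgets
        simp at hgets
      refine ⟨i.toNat, hlen, ?_, ?_⟩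
      · rw [Int.toNat_of_nonneg hi]; exact hc.1
      · have : scores[i.toNat] = s := by
          have := hgets; rwa [List.getElem?_eq_getElem hlen, Option.some_inj] at this
        rw [this]; exact hc.2
    · exact ih (i + 1) (by omega) hdrop' (by simpa [hc] using htrue)

lemma filter_singleton {α : Type} (p : α → Bool) :
    ∀ (l : List α) (n : Nat) (hn : n < l.length), p l[n] = true →
      (∀ j, (hj : j < l.length) → j ≠ n → p l[j] = false) →
      l.filter p = [l[n]] := by
  intro l
  induction l with
  | nil => intro n hn; exact absurd hn (by simp)
  | cons x xs ih =>
    intro n hn hp hothers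
    cases n with
    | zero =>
      have hxs : xs.filter p = [] := by
        apply List.filter_eq_nil_iff.mpr
        intro a ha
        obtain ⟨j, hj, hja⟩ := List.mem_iff_getElem.mp ha
        have := hothers (j + 1) (by simpa using Nat.succ_lt_succ hj) (by omega)
        simpa [hja] using this
      simp at hp
      simp [hp, hxs]
    | succ n' =>
      have hx : p x = false := by simpa using hothers 0 (by omega) (by omega)
      have := ih n' (by simpa using Nat.lt_of_succ_lt_succ hn) (by simpa using hp)
        (fun j hj hjn => by
          have := hothers (j + 1) (by simpa using Nat.succ_lt_succ hj) (by omega)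
          simpa using this)
      simp [hx]
      simpa using this

-- two distinct in-range indices whose elements pass the filter give filter length ≥ 2
lemma two_le_filter_length {α : Type} (p : α → Bool) (l : List α) (j k : Nat)
    (hjk : j < k) (hk : k < l.length) (hpj : p l[j] = true) (hpk : p l[k] = true) :
    2 ≤ (l.filter p).length := by
  have hj : j < l.length := lt_trans hjk hk
  have hsub : List.Sublist [l[j], l[k]] l := by
    have hdropj : l.drop j = l[j] :: l.drop (j + 1) := List.drop_eq_getElem_cons hj
    have hkmem : l[k] ∈ l.drop (j + 1) := by
      have hq : (l.drop (j + 1))[k - (j + 1)]? = some l[k] := by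
        rw [List.getElem?_drop, show j + 1 + (k - (j + 1)) = k by omega]
        exact List.getElem?_eq_getElem hk
      exact List.mem_of_getElem? hq
    have h1 : List.Sublist [l[j], l[k]] (l[j] :: l.drop (j + 1)) :=
      List.Sublist.cons₂ _ (List.singleton_sublist.mpr hkmem)
    have h2 : List.Sublist (l.drop j) l := List.drop_sublist _ _
    rw [hdropj] at h2
    exact h1.trans h2
  have := (hsub.filter p).length_le
  simpa [List.filter, hpj, hpk] using this

-- Python max(xs, key) on a nonempty list is the first-occurrence argmax fold
lemma max?_foldl_pick (f : List Int → Int) :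
    ∀ (xs : List (List Int)) (b : List Int),
      PySem.List.max? (b :: xs) f = some (xs.foldl (pickF f) b) := by
  intro xs
  induction xs with
  | nil => intro b; rfl
  | cons s xs ih =>
    intro b
    have hstep : PySem.List.max? (b :: s :: xs) f
        = PySem.List.max? ((if f b < f s then s else b) :: xs) f := by
      by_cases hc : f b < f s <;> simp [PySem.List.max?, List.foldl_cons, hc]
    rw [hstep, ih, List.foldl_cons]
    simp only [pickF, gt_iff_lt]

lemma gB_eq_gA : gB = gA := rfl

lemma pick_self (f : List Int → Int) (b : List Int) : pickF f b b = b := by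
  simp [pickF]

-- winnerByDif of a nonempty list is the first-occurrence argmax by gA · 3
lemma winnerByDif_eq (fh : List Int) (ft : List (List Int)) :
    winnerByDif (fh :: ft) = ft.foldl (pickF (fun s => gA s 3)) fh := by
  obtain ⟨n, hn, hget⟩ := loopIdxA_spec (fun s => gA s 3) (fh :: ft) (fh :: ft) 0 0 fh
    (le_refl 0) rfl (le_refl 0) (by simp)
  unfold winnerByDif
  rw [hn, rowA_of_getElem (by omega) (by simpa using hget)]
  simp [pick_self]

-- ===== VERDICT (by name: the statement is the Claim_ definition above) =====
theorem winnerByGoal_spec : Claim_equal_winnerByGoal := by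
  intro scores _ hpre
  have hne := hpre.1
  unfold Spec_winnerByGoal
  obtain ⟨h, t, rfl⟩ : ∃ h t, scores = h :: t := by
    cases scores with
    | nil => exact absurd rfl hne
    | cons h t => exact ⟨h, t, rfl⟩
  set f2 : List Int → Int := fun s => gA s 2 with hf2
  set f3 : List Int → Int := fun s => gA s 3 with hf3
  set F : List Int := t.foldl (pickF f2) h with hF
  obtain ⟨n, hn, hget⟩ := loopIdxA_spec f2 (h :: t) (h :: t) 0 0 h
    (le_refl 0) rfl (le_refl 0) (by simp)
  rw [List.foldl_cons, pick_self] at hget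
  have hrowm : rowA (h :: t) ((n : Nat) : Int) = F := rowA_of_getElem (by omega) (by simpa using hget)
  have hnlen : n < (h :: t).length := by
    by_contra hcon
    rw [List.getElem?_eq_none (by omega)] at hget
    simp at hget
  have hFn : (h :: t)[n] = F := by
    have := hget; rw [List.getElem?_eq_getElem hnlen] at this
    exact Option.some.inj this
  have hFmem : F ∈ h :: t := foldl_pick_mem f2 t h
  -- B's 'top' is f2 F
  obtain ⟨m0, rest0, hord⟩ : ∃ m0 rest0,
      PySem.List.sorted (h :: t) (fun s => gB s 2) true = m0 :: rest0 := by
    cases hcase : PySem.List.sorted (h :: t) (fun s => gB s 2) true with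
    | nil => exact absurd ((PySem.List.sorted_eq_nil_iff _ _ _).mp hcase) (by simp)
    | cons m0 rest0 => exact ⟨m0, rest0, rfl⟩
  have hm0mem : m0 ∈ h :: t := by
    have : m0 ∈ PySem.List.sorted (h :: t) (fun s => gB s 2) true := by
      rw [hord]; exact List.mem_cons_self ..
    rwa [PySem.List.mem_sorted] at this
  have hm0ge : ∀ y ∈ h :: t, gB y 2 ≤ gB m0 2 :=
    PySem.List.key_head_sorted_rev_ge _ _ hord
  have htop : gB ((PySem.List.pyGet? (m0 :: rest0) 0).getD []) 2 = f2 F := by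
    have hget0 : PySem.List.pyGet? (m0 :: rest0) 0 = some m0 := by
      rw [PySem.List.pyGet?_of_nonneg _ (le_refl 0)]; rfl
    rw [hget0]
    have h1 : gB m0 2 ≤ f2 F := by
      have := mem_le_pick f2 t h m0 hm0mem
      simpa [gB_eq_gA, ← hF] using this
    have h2 : f2 F ≤ gB m0 2 := hm0ge F hFmem
    simp only [Option.getD_some]
    omega
  -- B's value unfolded
  have hBval : winnerByGoal_alt (h :: t) =
      (let group := (h :: t).filter (fun s => gB s 2 == f2 F)
       if group.length = 1 then (PySem.List.pyGet? group 0).getD []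
       else (PySem.List.max? group (fun s => gB s 3)).getD []) := by
    show (let ordered := PySem.List.sorted (h :: t) (fun s => gB s 2) true
          let top := gB ((PySem.List.pyGet? ordered 0).getD []) 2
          let group := (h :: t).filter (fun s => gB s 2 == top)
          if group.length = 1 then (PySem.List.pyGet? group 0).getD []
          else (PySem.List.max? group (fun s => gB s 3)).getD []) = _
    simp only [hord, htop]
  rw [hBval]
  have hpredF : (fun s => gB s 2 == f2 F) F = true := by
    rw [gB_eq_gA]; exact beq_self_eq_true _
  -- A's value unfolded
  show (let m := loopIdxA f2 (h :: t) (h :: t) 0 0;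
        if tieLoopA (h :: t) m (h :: t) 0 then
          winnerByDif ((h :: t).filter (fun x => gA x 2 == gA (rowA (h :: t) m) 2))
        else rowA (h :: t) m) = _
  simp only [hn, hrowm]
  by_cases htie : tieLoopA (h :: t) ((n : Nat) : Int) (h :: t) 0
  · rw [if_pos htie]
    -- a tie exists: the filter group has at least two elements
    obtain ⟨j, hj, hjn, hjeq⟩ := tieLoopA_true (h :: t) ((n : Nat) : Int) (h :: t) 0
      (le_refl 0) rfl htie
    rw [hrowm] at hjeq
    have hjn' : j ≠ n := fun hc => hjn (by exact_mod_cast hc)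
    have hpj : (fun s => gB s 2 == f2 F) (h :: t)[j] = true := by
      rw [gB_eq_gA]; exact beq_iff_eq.mpr hjeq
    have hpn : (fun s => gB s 2 == f2 F) (h :: t)[n] = true := by rw [hFn]; exact hpredF
    have h2le : 2 ≤ ((h :: t).filter (fun s => gB s 2 == f2 F)).length := by
      rcases Nat.lt_or_ge j n with hlt | hge
      · exact two_le_filter_length _ _ j n hlt hnlen hpj hpn
      · exact two_le_filter_length _ _ n j (by omega) hj hpn hpj
    obtain ⟨fh, ft, hfil⟩ : ∃ fh ft, (h :: t).filter (fun s => gB s 2 == f2 F) = fh :: ft := by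
      cases hcase : (h :: t).filter (fun s => gB s 2 == f2 F) with
      | nil => rw [hcase] at h2le; simp at h2le
      | cons fh ft => exact ⟨fh, ft, rfl⟩
    have hlen1 : ¬ ((h :: t).filter (fun s => gB s 2 == f2 F)).length = 1 := by omega
    simp only [hfil] at hlen1 ⊢
    rw [if_neg hlen1, max?_foldl_pick]
    have : (h :: t).filter (fun x => gA x 2 == gA F 2) = fh :: ft := by
      rw [← hfil]; rfl
    rw [this, winnerByDif_eq]
    rfl
  · rw [if_neg htie]
    -- no tie: the filter group is exactly [F]
    have hidx := tieLoopA_false (h :: t) ((n : Nat) : Int) (h :: t) 0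
      (le_refl 0) rfl (by simpa using htie)
    have hsingle : (h :: t).filter (fun s => gB s 2 == f2 F) = [(h :: t)[n]] := by
      apply filter_singleton (fun s => gB s 2 == f2 F) (h :: t) n hnlen
      · rw [hFn]; exact hpredF
      · intro j hj hjn
        have hne2 : gA (h :: t)[j] 2 ≠ gA (rowA (h :: t) ((n : Nat) : Int)) 2 :=
          hidx j (by omega) hj (by exact_mod_cast hjn)
        rw [hrowm] at hne2
        rw [gB_eq_gA]
        exact beq_eq_false_iff_ne.mpr hne2
    rw [hsingle, hFn]
    simp [PySem.List.pyGet?, PySem.List.pyIdx?]
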